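-- pv_equiv track=rewrite | github.com/DroolSpittle/codeSnippets | capitalizeStrings.py | solve
-- ===== SOURCE A (Python) =====
-- def solve(s):
--     if s == "":
--         return s
--     words = s.split(" ")
--     results = []
--     for item in words:
--         if item.isdigit():
--             results.append(item)
--         else:
--             results.append(item.capitalize())
--     return " ".join(results)
-- ===== SOURCE B (Python) =====
-- def solve(s):
--     out = []
--     i = 0
--     n = len(s)
--     while i < n:
--         if s[i] == ' ':
--             out.append(' ')
--             i += 1
--         else:
--             j = i
--             while j < n and s[j] != ' ':
--                 j += 1
--             out.append(s[i:j].capitalize())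
--             i = j
--     return ''.join(out)
-- ===== Notes on version B (the rewrite author's own statement) =====
-- stated objective: alternative
-- what changed: B replaces split-on-space / per-word branch / join with a single left-to-right scan that copies spaces and capitalizes each maximal non-space run in place, dropping the isdigit special case (capitalize() is a no-op on all-digit runs).
import Mathlib
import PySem

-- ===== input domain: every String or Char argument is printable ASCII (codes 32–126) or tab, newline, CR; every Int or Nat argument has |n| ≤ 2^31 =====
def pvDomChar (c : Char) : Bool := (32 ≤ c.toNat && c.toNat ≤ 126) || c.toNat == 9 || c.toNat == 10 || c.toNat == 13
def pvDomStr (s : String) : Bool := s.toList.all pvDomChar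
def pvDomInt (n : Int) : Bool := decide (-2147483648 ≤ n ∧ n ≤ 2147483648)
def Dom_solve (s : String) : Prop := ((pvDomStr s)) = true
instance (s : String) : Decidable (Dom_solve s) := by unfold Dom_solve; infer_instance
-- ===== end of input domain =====

-- B: one left-to-right scan capitalizing each maximal non-space run in place, instead of
-- A's split(" ") / per-word isdigit branch / join (capitalize() is a no-op on digit runs).

-- Python's str.capitalize() on a list of ASCII chars (exact on the printable-ASCII domain:
-- first char title-cased = uppercased, remaining chars lowercased). Used by both ports.
def pyCapChars : List Char → List Char
  | [] => []
  | c :: rest => PySem.Chars.upperChar c :: rest.map PySem.Chars.lowerChar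

-- ===== PORT A =====
def solve (s : String) : String :=
  if s == "" then s
  else
    let words := (PySem.Str.split? s " ").getD []   -- s.split(" "); sep ≠ "" so never none
    let results := words.foldl (fun acc item =>
      if PySem.Str.strIsdigit item then acc ++ [item]
      else acc ++ [String.ofList (pyCapChars item.toList)]) []
    PySem.Str.join " " results

-- ===== PORT B =====
-- the outer while-loop of Source B: copy a space, or capitalize the maximal non-space run s[i:j]
def bScan : List Char → List Char
  | [] => []
  | c :: rest =>
    if c = ' ' then ' ' :: bScan rest
    else
      let run := rest.takeWhile (· ≠ ' ')
      pyCapChars (c :: run) ++ bScan (rest.drop run.length)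
termination_by l => l.length
decreasing_by
  · simp
  · simp only [List.length_cons, List.length_drop]; omega

def solve_alt (s : String) : String := String.ofList (bScan s.toList)

-- ===== PRECONDITION & SPEC =====
def Spec_solve (s : String) (out : String) : Prop := out = solve_alt s
instance (s : String) (out : String) : Decidable (Spec_solve s out) := by unfold Spec_solve; infer_instance

-- ===== CLAIM (what is proved, stated in full; the proofs are below) =====
def Claim_equal_solve : Prop := ∀ (s : String), Dom_solve s → Spec_solve s (solve s)

-- ===== LEMMAS AND PROOFS =====

-- simple structural splitter: what s.split(" ") computes, stated recursively
def mySplit : List Char → List (List Char)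
  | [] => [[]]
  | c :: rest =>
    if c = ' ' then [] :: mySplit rest
    else
      match mySplit rest with
      | [] => [[c]]
      | w :: ws => (c :: w) :: ws

theorem mySplit_ne_nil (cs : List Char) : mySplit cs ≠ [] := by
  cases cs with
  | nil => simp [mySplit]
  | cons c rest =>
    simp only [mySplit]
    split
    · simp
    · split <;> simp

theorem splitOn_go_space (fuel : Nat) (l cur : List Char) (acc : List (List Char))
    (h : l.length < fuel) :
    PySem.Chars.splitOn.go [' '] fuel l cur acc =
      acc.reverse ++ (match mySplit l with
        | [] => []
        | w :: ws => (cur.reverse ++ w) :: ws) := by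
  induction fuel generalizing l cur acc with
  | zero => omega
  | succ fuel ih =>
    cases l with
    | nil => simp [PySem.Chars.splitOn.go, mySplit]
    | cons c rest =>
      by_cases hc : c = ' '
      · subst hc
        rw [show PySem.Chars.splitOn.go [' '] (fuel + 1) (' ' :: rest) cur acc =
              PySem.Chars.splitOn.go [' '] fuel (List.drop 1 (' ' :: rest)) [] (cur.reverse :: acc) by
            simp [PySem.Chars.splitOn.go, List.isPrefixOf]]
        rw [List.drop_one, List.tail_cons, ih rest [] (cur.reverse :: acc) (by simpa using h)]
        have hne := mySplit_ne_nil rest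
        cases hms : mySplit rest with
        | nil => exact absurd hms hne
        | cons w ws => simp [mySplit, hms]
      · rw [show PySem.Chars.splitOn.go [' '] (fuel + 1) (c :: rest) cur acc =
              PySem.Chars.splitOn.go [' '] fuel rest (c :: cur) acc by
            simp [PySem.Chars.splitOn.go, List.isPrefixOf, beq_iff_eq, Ne.symm hc]]
        rw [ih rest (c :: cur) acc (by simpa using h)]
        have hne := mySplit_ne_nil rest
        cases hms : mySplit rest with
        | nil => exact absurd hms hne
        | cons w ws => simp [mySplit, hc, hms]

theorem splitOn_space (cs : List Char) : PySem.Chars.splitOn cs [' '] = mySplit cs := by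
  unfold PySem.Chars.splitOn
  rw [splitOn_go_space _ _ _ _ (by omega)]
  have hne := mySplit_ne_nil cs
  cases hms : mySplit cs with
  | nil => exact absurd hms hne
  | cons w ws => simp

theorem lowerChar_digit {c : Char} (h : PySem.Chars.isdigit c = true) :
    PySem.Chars.lowerChar c = c := by
  simp only [PySem.Chars.isdigit, Bool.and_eq_true, decide_eq_true_eq] at h
  have h' : ¬ (PySem.Chars.isupper c = true) := by
    simp only [PySem.Chars.isupper, Bool.and_eq_true, decide_eq_true_eq, not_and]
    intro hA _
    exact absurd (le_trans hA h.2) (by decide)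
  simp [PySem.Chars.lowerChar, h']

theorem upperChar_digit {c : Char} (h : PySem.Chars.isdigit c = true) :
    PySem.Chars.upperChar c = c := by
  simp only [PySem.Chars.isdigit, Bool.and_eq_true, decide_eq_true_eq] at h
  have h' : ¬ (PySem.Chars.islower c = true) := by
    simp only [PySem.Chars.islower, Bool.and_eq_true, decide_eq_true_eq, not_and]
    intro ha _
    exact absurd (le_trans ha h.2) (by decide)
  simp [PySem.Chars.upperChar, h']

theorem pyCapChars_digits {w : List Char} (h : PySem.Chars.strIsdigit w = true) :
    pyCapChars w = w := by
  cases w with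
  | nil => rfl
  | cons c rest =>
    simp only [PySem.Chars.strIsdigit, Bool.and_eq_true, List.all_cons, List.all_eq_true] at h
    rw [pyCapChars, upperChar_digit h.2.1,
      List.map_congr_left (fun x hx => lowerChar_digit (h.2.2 x hx)), List.map_id']

theorem join_cons_of_ne_nil (x : List Char) (l : List (List Char)) (h : l ≠ []) :
    PySem.Chars.join [' '] (x :: l) = x ++ ' ' :: PySem.Chars.join [' '] l := by
  cases l with
  | nil => exact absurd rfl h
  | cons y ys => rw [PySem.Chars.join_cons_cons]; simp

theorem drop_takeWhile_length (p : Char → Bool) (l : List Char) :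
    l.drop (l.takeWhile p).length = l.dropWhile p := by
  induction l with
  | nil => rfl
  | cons c rest ih =>
    by_cases hc : p c
    · simp [hc, ih]
    · simp [hc]

theorem mySplit_word_append (w t : List Char) (hw : ∀ x ∈ w, x ≠ ' ') :
    mySplit (w ++ t) = match mySplit t with
      | [] => []
      | x :: xs => (w ++ x) :: xs := by
  induction w with
  | nil =>
    have hne := mySplit_ne_nil t
    cases hms : mySplit t with
    | nil => exact absurd hms hne
    | cons x xs => simp [hms]
  | cons c cw ih =>
    have hc : c ≠ ' ' := hw c (by simp)
    have ih' := ih (by intro x hx; exact hw x (by simp [hx]))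
    have hne := mySplit_ne_nil t
    cases hms : mySplit t with
    | nil => exact absurd hms hne
    | cons x xs =>
      simp only [hms] at ih'
      simp only [List.cons_append, mySplit, hc, if_false, ih']

theorem dropWhile_head_false {p : Char → Bool} {l l2 : List Char} {d : Char}
    (h : l.dropWhile p = d :: l2) : p d = false := by
  induction l with
  | nil => simp at h
  | cons a t ih =>
    rw [List.dropWhile_cons] at h
    split at h
    · exact ih h
    · cases h
      simpa using ‹¬ p d = true›

theorem bScan_space (rest : List Char) : bScan (' ' :: rest) = ' ' :: bScan rest := by
  rw [bScan]; simp

theorem mySplit_space (rest : List Char) : mySplit (' ' :: rest) = [] :: mySplit rest := by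
  simp [mySplit]

theorem bScan_join (cs : List Char) :
    bScan cs = PySem.Chars.join [' '] ((mySplit cs).map pyCapChars) := by
  induction cs using bScan.induct with
  | case1 => simp [bScan, mySplit, PySem.Chars.join_singleton, pyCapChars]
  | case2 rest ih =>
    rw [bScan_space, ih, mySplit_space, List.map_cons,
      join_cons_of_ne_nil _ _ (by simp [mySplit_ne_nil])]
    simp [pyCapChars]
  | case3 c rest hc run ih =>
    have hbs : bScan (c :: rest) =
        pyCapChars (c :: rest.takeWhile (· ≠ ' ')) ++
          bScan (rest.drop (rest.takeWhile (· ≠ ' ')).length) := by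
      rw [bScan]; simp [hc]
    have hdrop : rest.drop (rest.takeWhile (· ≠ ' ')).length = rest.dropWhile (· ≠ ' ') :=
      drop_takeWhile_length _ _
    have hrun : ∀ x ∈ c :: rest.takeWhile (· ≠ ' '), x ≠ ' ' := by
      intro x hx
      rcases List.mem_cons.mp hx with h | h
      · exact h ▸ hc
      · simpa using List.mem_takeWhile_imp h
    have hrest : c :: rest = (c :: rest.takeWhile (· ≠ ' ')) ++ rest.dropWhile (· ≠ ' ') := by
      simp
    cases hrem : rest.dropWhile (· ≠ ' ') with
    | nil =>
      have hms : mySplit (c :: rest) = [c :: rest.takeWhile (· ≠ ' ')] := by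
        conv_lhs => rw [hrest, hrem]
        rw [mySplit_word_append _ _ hrun]
        simp [mySplit]
      rw [hbs, hdrop, hrem, hms]
      simp [bScan, PySem.Chars.join_singleton]
    | cons d r2 =>
      have hd : d = ' ' := by
        simpa using dropWhile_head_false hrem
      subst hd
      have hms : mySplit (c :: rest) = (c :: rest.takeWhile (· ≠ ' ')) :: mySplit r2 := by
        conv_lhs => rw [hrest, hrem]
        rw [mySplit_word_append _ _ hrun]
        simp [mySplit_space]
      rw [hdrop, hrem, bScan_space, mySplit_space, List.map_cons,
        join_cons_of_ne_nil _ _ (by simp [mySplit_ne_nil])] at ih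
      simp only [pyCapChars, List.nil_append] at ih
      have ih2 : bScan r2 = PySem.Chars.join [' '] ((mySplit r2).map pyCapChars) := by
        simpa using ih
      rw [hbs, hdrop, hrem, bScan_space, hms, List.map_cons,
        join_cons_of_ne_nil _ _ (by simp [mySplit_ne_nil]), ih2]
    
-- ===== VERDICT (by name: the statement is the Claim_ definition above) =====
theorem solve_words (s : String) :
    (PySem.Str.split? s " ").getD [] = (mySplit s.toList).map String.ofList := by
  rw [PySem.Str.split?, show (" " : String).toList = [' '] from rfl, PySem.Chars.split?]
  simp [splitOn_space]

theorem solve_spec : Claim_equal_solve := by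
  intro s _
  unfold Spec_solve solve solve_alt
  by_cases hs : s = ""
  · subst hs
    rw [if_pos (by rfl), show ("" : String).toList = [] from rfl, bScan]
  · rw [if_neg (by simpa using hs)]
    simp only [solve_words]
    rw [show (fun (acc : List String) item => if PySem.Str.strIsdigit item then acc ++ [item]
          else acc ++ [String.ofList (pyCapChars item.toList)]) =
        fun acc item => acc ++ [if PySem.Str.strIsdigit item then item
          else String.ofList (pyCapChars item.toList)] by
      funext acc item; split <;> rfl]
    rw [PySem.List.foldl_append_singleton_eq_map, List.nil_append, List.map_map]
    rw [List.map_congr_left (g := fun w => String.ofList (pyCapChars w)) (by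
      intro w _
      simp only [Function.comp_apply, PySem.Str.strIsdigit, String.toList_ofList]
      by_cases hdw : PySem.Chars.strIsdigit w = true
      · rw [if_pos hdw, pyCapChars_digits hdw]
      · rw [if_neg hdw])]
    rw [PySem.Str.join, show (" " : String).toList = [' '] from rfl, List.map_map]
    rw [show (String.toList ∘ fun w => String.ofList (pyCapChars w)) = pyCapChars by
      funext w; simp]
    rw [← bScan_join]
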